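-- pv_equiv track=rewrite | github.com/nashtu3000/audio-file-transcript | transcribe_audio.py | count_speakers
-- ===== SOURCE A (Python) =====
-- from typing import List, Tuple, Optional
--
-- def count_speakers(transcript_text: str) -> Tuple[int, List[str]]:
--     """Count unique speakers in transcript"""
--     speakers = set()
--     for line in transcript_text.split('\n'):
--         if ':' in line and line.strip():
--             parts = line.split(']', 1)
--             if len(parts) > 1:
--                 speaker_part = parts[1].split(':', 1)
--                 if len(speaker_part) > 1:
--                     speaker = speaker_part[0].strip()
--                     if speaker:
--                         speakers.add(speaker)
--     return len(speakers), sorted(list(speakers))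
-- ===== SOURCE B (Python) =====
-- def count_speakers(transcript_text):
--     """Count unique speakers in transcript"""
--     speakers = set()
--     state = 0          # 0: before ']', 1: collecting the name, 2: line finished
--     buf = []
--     for ch in transcript_text + '\n':
--         if ch == '\n':
--             state = 0
--             buf = []
--         elif state == 0:
--             if ch == ']':
--                 state = 1
--         elif state == 1:
--             if ch == ':':
--                 name = ''.join(buf).strip()
--                 if name:
--                     speakers.add(name)
--                 state = 2
--                 buf = []
--             else:
--                 buf.append(ch)
--     return len(speakers), sorted(speakers)
-- ===== Notes on version B (the rewrite author's own statement) =====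
-- stated objective: alternative
-- what changed: B replaces A's split-into-lines plus per-line two-stage substring-splitting cascade by one character-level state machine scanning the whole text in a single pass (states: before the closing bracket, collecting the name, line done; a newline resets), so no line list or per-line splitting exists at all.
import Mathlib
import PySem

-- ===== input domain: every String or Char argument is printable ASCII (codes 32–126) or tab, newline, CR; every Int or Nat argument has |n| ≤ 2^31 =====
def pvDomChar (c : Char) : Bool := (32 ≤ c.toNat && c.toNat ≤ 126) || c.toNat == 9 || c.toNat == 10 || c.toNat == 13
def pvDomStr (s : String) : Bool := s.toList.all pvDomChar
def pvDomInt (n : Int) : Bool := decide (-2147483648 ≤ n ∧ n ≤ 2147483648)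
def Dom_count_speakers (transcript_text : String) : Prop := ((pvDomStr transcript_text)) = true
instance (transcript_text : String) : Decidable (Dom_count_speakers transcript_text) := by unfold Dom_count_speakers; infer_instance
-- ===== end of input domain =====

-- B replaces A's line-splitting and per-line split(']',1)/split(':',1) cascade by a single
-- character-level state-machine pass over the whole text (alternative algorithm, same cost).

-- ===== PORT A =====
-- one line of A's loop body: the ':' in line / line.strip() guard, then the split(']',1)/split(':',1) cascade
def pvStepA (s : PySem.Set (List Char)) (cs : List Char) : PySem.Set (List Char) :=
  if PySem.Chars.isIn [':'] cs && !(PySem.Chars.strip cs).isEmpty then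
    let parts := PySem.Chars.splitOnMax cs [']'] 1
    if 1 < parts.length then
      let sp := PySem.Chars.splitOnMax (parts.getD 1 []) [':'] 1
      if 1 < sp.length then
        let speaker := PySem.Chars.strip (sp.getD 0 [])
        if !speaker.isEmpty then PySem.Set.add s speaker else s
      else s
    else s
  else s

def count_speakers (transcript_text : String) : Int × List String :=
  let speakers := (PySem.Chars.splitOn transcript_text.toList ['\n']).foldl pvStepA PySem.Set.empty
  ((speakers.length : Int), PySem.List.sorted (speakers.map String.ofList) (fun x => x) false)

-- ===== PORT B =====
-- machine state: (speakers set, state 0/1/2, buf); one transition of B's loop body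
def pvStepC (st : PySem.Set (List Char) × Nat × List Char) (c : Char) :
    PySem.Set (List Char) × Nat × List Char :=
  if c = '\n' then (st.1, 0, [])
  else if st.2.1 = 0 then
    if c = ']' then (st.1, 1, st.2.2) else st
  else if st.2.1 = 1 then
    if c = ':' then
      let name := PySem.Chars.strip st.2.2
      ((if !name.isEmpty then PySem.Set.add st.1 name else st.1), 2, [])
    else (st.1, 1, st.2.2 ++ [c])
  else st

def count_speakers_alt (transcript_text : String) : Int × List String :=
  let fin := (transcript_text.toList ++ ['\n']).foldl pvStepC (PySem.Set.empty, 0, [])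
  let speakers := fin.1
  ((speakers.length : Int), PySem.List.sorted (speakers.map String.ofList) (fun x => x) false)

-- ===== PRECONDITION & SPEC =====
def Spec_count_speakers (transcript_text : String) (out : Int × List String) : Prop := out = count_speakers_alt transcript_text
instance (transcript_text : String) (out : Int × List String) : Decidable (Spec_count_speakers transcript_text out) := by unfold Spec_count_speakers; infer_instance

-- ===== CLAIM =====
def Claim_equal_count_speakers : Prop := ∀ (transcript_text : String), Dom_count_speakers transcript_text → Spec_count_speakers transcript_text (count_speakers transcript_text)

-- ===== LEMMAS AND PROOFS =====

-- str.partition at a one-char separator, as a proof-side characterisation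
def pvPartition (cs : List Char) (sep : Char) : List Char × Bool × List Char :=
  match cs with
  | [] => ([], false, [])
  | c :: rest =>
    if c = sep then ([], true, rest)
    else
      let r := pvPartition rest sep
      (c :: r.1, r.2.1, r.2.2)

-- per-line meaning of B's machine (proof-side)
def pvStepB (s : PySem.Set (List Char)) (cs : List Char) : PySem.Set (List Char) :=
  let p := pvPartition cs ']'
  if p.2.1 then
    let q := pvPartition p.2.2 ':'
    if q.2.1 then
      let name := PySem.Chars.strip q.1
      if !name.isEmpty then PySem.Set.add s name else s
    else s
  else s

theorem pvPartition_found {cs : List Char} {d : Char} (h : (pvPartition cs d).2.1 = true) :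
    cs = (pvPartition cs d).1 ++ d :: (pvPartition cs d).2.2 := by
  induction cs with
  | nil => simp [pvPartition] at h
  | cons c rest ih =>
    simp only [pvPartition] at h ⊢
    split at h <;> rename_i hc
    · simp [hc]
    · simp only [hc, if_false] at *
      simpa using congrArg (c :: ·) (ih h)

theorem pvPartition_not_found {cs : List Char} {d : Char}
    (h : (pvPartition cs d).2.1 = false) : d ∉ cs := by
  induction cs with
  | nil => simp
  | cons c rest ih =>
    simp only [pvPartition] at h
    split at h <;> rename_i hc
    · simp at h
    · simp only [List.mem_cons]
      rintro (rfl | hm)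
      · exact hc rfl
      · exact ih h hm

theorem pvPartition_fst_not_mem (cs : List Char) (d : Char) : d ∉ (pvPartition cs d).1 := by
  induction cs with
  | nil => simp [pvPartition]
  | cons c rest ih =>
    simp only [pvPartition]
    split <;> rename_i hc
    · simp
    · simp only [List.mem_cons]
      rintro (rfl | hm)
      · exact hc rfl
      · exact ih hm

-- splitOnMax.go with maxsplit 0 returns the remainder as the single last piece
theorem go_zero (d : Char) (fuel : Nat) (l cur : List Char) (acc : List (List Char)) :
    PySem.Chars.splitOnMax.go [d] fuel 0 l cur acc = ((cur.reverse ++ l) :: acc).reverse := by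
  cases fuel with
  | zero => rfl
  | succ n => cases l with
    | nil => simp [PySem.Chars.splitOnMax.go]
    | cons c rest => simp [PySem.Chars.splitOnMax.go]

-- splitOnMax.go with maxsplit 1 IS pvPartition
theorem go_one (d : Char) (cs : List Char) : ∀ (fuel : Nat) (cur : List Char) (acc : List (List Char)),
    cs.length < fuel →
    PySem.Chars.splitOnMax.go [d] fuel 1 cs cur acc =
      (if (pvPartition cs d).2.1 then
        acc.reverse ++ [cur.reverse ++ (pvPartition cs d).1, (pvPartition cs d).2.2]
      else acc.reverse ++ [cur.reverse ++ cs]) := by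
  induction cs with
  | nil =>
    intro fuel cur acc hf
    cases fuel with
    | zero => omega
    | succ n => simp [PySem.Chars.splitOnMax.go, pvPartition]
  | cons c rest ih =>
    intro fuel cur acc hf
    cases fuel with
    | zero => omega
    | succ n =>
      by_cases hc : c = d
      · subst hc
        simp only [PySem.Chars.splitOnMax.go, List.isPrefixOf, BEq.rfl, Bool.true_and, if_true,
          one_ne_zero, if_false]
        rw [go_zero]
        simp [pvPartition]
      · have hpre : ([d].isPrefixOf (c :: rest)) = false := by
          simp [List.isPrefixOf]
          exact fun h => absurd h.symm hc
        simp only [PySem.Chars.splitOnMax.go, hpre, one_ne_zero, if_false, Bool.false_eq_true]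
        rw [ih n (c :: cur) acc (by simpa using Nat.lt_of_succ_lt_succ hf)]
        simp [pvPartition, hc]

theorem splitOnMax_one (d : Char) (cs : List Char) :
    PySem.Chars.splitOnMax cs [d] 1 =
      (if (pvPartition cs d).2.1 then [(pvPartition cs d).1, (pvPartition cs d).2.2]
       else [cs]) := by
  have h := go_one d cs (cs.length + 1) [] [] (Nat.lt_succ_self _)
  simp only [PySem.Chars.splitOnMax]
  norm_num at h ⊢
  exact h

theorem strip_eq_nil_all_space {cs : List Char} (h : PySem.Chars.strip cs = []) :
    ∀ c ∈ cs, PySem.Chars.isspace c = true := by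
  intro c hc
  simp only [PySem.Chars.strip, PySem.Chars.rstrip, PySem.Chars.lstrip] at h
  rw [List.reverse_eq_nil_iff, List.dropWhile_eq_nil_iff] at h
  simp only [List.mem_reverse] at h
  rcases List.mem_append.mp ((List.takeWhile_append_dropWhile (p := PySem.Chars.isspace) (l := cs)) ▸ hc) with h1 | h1
  · exact List.mem_takeWhile_imp h1
  · exact h _ h1

theorem mem_isIn {cs : List Char} {c : Char} (h : c ∈ cs) : PySem.Chars.isIn [c] cs = true := by
  have : [c] <:+: cs := by
    rcases List.mem_iff_append.mp h with ⟨l, r, rfl⟩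
    exact ⟨l, r, by simp⟩
  exact (PySem.Chars.isIn_iff_infix _ _).mpr this

-- A's per-line step equals the partition form
theorem step_eq : pvStepA = pvStepB := by
  funext s cs
  simp only [pvStepA, pvStepB]
  cases hb : (pvPartition cs ']').2.1 with
  | false =>
    simp only [splitOnMax_one, hb, if_false, Bool.false_eq_true, List.length_singleton]
    norm_num
  | true =>
    have hcs := pvPartition_found hb
    cases hcol : (pvPartition (pvPartition cs ']').2.2 ':').2.1 with
    | false =>
      simp only [splitOnMax_one, hb, if_true, if_false, Bool.false_eq_true]
      split
      · norm_num [splitOnMax_one, hcol]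
      · rfl
    | true =>
      have hrest := pvPartition_found hcol
      have hcolon_mem : (':' : Char) ∈ cs := by
        rw [hcs, hrest]; simp
      have hguard1 : PySem.Chars.isIn [':'] cs = true := mem_isIn hcolon_mem
      have hguard2 : (PySem.Chars.strip cs).isEmpty = false := by
        cases hE : (PySem.Chars.strip cs).isEmpty with
        | false => rfl
        | true =>
          have hnil : PySem.Chars.strip cs = [] := List.isEmpty_iff.mp hE
          have hbr : (']' : Char) ∈ cs := by rw [hcs]; simp
          have := strip_eq_nil_all_space hnil ']' hbr
          have hsp : PySem.Chars.isspace ']' = false := by decide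
          rw [hsp] at this
          exact absurd this Bool.false_ne_true
      simp only [hguard1, hguard2, Bool.not_false, Bool.and_true, if_true,
        splitOnMax_one, hb]
      simp [hcol]

-- lines of a text, by first-newline partition (proof-side model of split('\n'))
def pvLines (cs : List Char) : List (List Char) :=
  let p := pvPartition cs '\n'
  if h : p.2.1 then p.1 :: pvLines p.2.2 else [cs]
termination_by cs.length
decreasing_by
  have := pvPartition_found h
  have : cs.length = (pvPartition cs '\n').1.length + 1 + (pvPartition cs '\n').2.2.length := by
    conv_lhs => rw [this]
    simp; omega
  omega

theorem pvLines_ne_nil (cs : List Char) : pvLines cs ≠ [] := by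
  rw [pvLines]; split <;> simp

-- splitOn.go computes pvLines
theorem go_lines (cs : List Char) : ∀ (fuel : Nat) (cur : List Char) (acc : List (List Char)),
    cs.length < fuel →
    PySem.Chars.splitOn.go ['\n'] fuel cs cur acc =
      acc.reverse ++ (cur.reverse ++ (pvLines cs).headI) :: (pvLines cs).tail := by
  induction cs with
  | nil =>
    intro fuel cur acc hf
    cases fuel with
    | zero => omega
    | succ n =>
      have : pvLines [] = [[]] := by rw [pvLines]; simp [pvPartition]
      simp [PySem.Chars.splitOn.go, this]
  | cons c rest ih =>
    intro fuel cur acc hf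
    cases fuel with
    | zero => omega
    | succ n =>
      by_cases hc : c = '\n'
      · subst hc
        simp only [PySem.Chars.splitOn.go, List.isPrefixOf, BEq.rfl, Bool.true_and, if_true,
          List.length_singleton, List.drop_succ_cons, List.drop_zero]
        rw [ih n [] (cur.reverse :: acc) (by simpa using Nat.lt_of_succ_lt_succ hf)]
        have : pvLines ('\n' :: rest) = [] :: pvLines rest := by
          rw [pvLines]; simp [pvPartition]
        rcases hr : pvLines rest with _ | ⟨l, ls⟩
        · exact absurd hr (pvLines_ne_nil rest)
        · simp [this, hr]
      · have hpre : (['\n'].isPrefixOf (c :: rest)) = false := by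
          simp [List.isPrefixOf]
          exact fun h => absurd h.symm hc
        simp only [PySem.Chars.splitOn.go, hpre, Bool.false_eq_true, if_false]
        rw [ih n (c :: cur) acc (by simpa using Nat.lt_of_succ_lt_succ hf)]
        have hl : pvLines (c :: rest) =
            (c :: (pvLines rest).headI) :: (pvLines rest).tail := by
          conv_lhs => rw [pvLines]
          simp only [pvPartition, hc, if_false]
          rcases hb : (pvPartition rest '\n').2.1 with _ | _
          · have : pvLines rest = [rest] := by rw [pvLines]; simp [hb]
            simp [hb, this]
          · have : pvLines rest = (pvPartition rest '\n').1 :: pvLines (pvPartition rest '\n').2.2 := by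
              conv_lhs => rw [pvLines]
              simp [hb]
            simp [hb, this]
        simp [hl]

theorem splitOn_eq_pvLines (cs : List Char) :
    PySem.Chars.splitOn cs ['\n'] = pvLines cs := by
  have h := go_lines cs (cs.length + 1) [] [] (Nat.lt_succ_self _)
  simp only [PySem.Chars.splitOn] at *
  rw [h]
  rcases hr : pvLines cs with _ | ⟨l, ls⟩
  · exact absurd hr (pvLines_ne_nil cs)
  · simp

-- the machine ignores everything after the name is committed (state 2)
theorem machine_state2 (cs : List Char) (s : PySem.Set (List Char)) (buf : List Char)
    (h : '\n' ∉ cs) : cs.foldl pvStepC (s, 2, buf) = (s, 2, buf) := by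
  induction cs with
  | nil => rfl
  | cons c rest ih =>
    simp only [List.mem_cons, not_or] at h
    have hc : ¬ c = '\n' := fun e => h.1 e.symm
    simp only [List.foldl_cons, pvStepC, hc, if_false]
    norm_num
    exact ih h.2

-- the machine in state 1 finds the first ':' and commits the stripped buffer
theorem machine_state1 (cs : List Char) : ∀ (s : PySem.Set (List Char)) (buf : List Char),
    '\n' ∉ cs →
    cs.foldl pvStepC (s, 1, buf) =
      (if (pvPartition cs ':').2.1 then
        ((if !(PySem.Chars.strip (buf ++ (pvPartition cs ':').1)).isEmpty then
            PySem.Set.add s (PySem.Chars.strip (buf ++ (pvPartition cs ':').1)) else s), 2,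
          ([] : List Char))
       else (s, 1, buf ++ cs)) := by
  induction cs with
  | nil => intro s buf h; simp [pvPartition]
  | cons c rest ih =>
    intro s buf h
    simp only [List.mem_cons, not_or] at h
    have hc : ¬ c = '\n' := fun e => h.1 e.symm
    by_cases hcol : c = ':'
    · subst hcol
      simp only [List.foldl_cons, pvStepC, hc, if_false]
      norm_num
      rw [machine_state2 _ _ _ h.2]
      simp [pvPartition]
    · simp only [List.foldl_cons, pvStepC, hc, if_false]
      norm_num [hcol]
      rw [ih s (buf ++ [c]) h.2]
      simp only [pvPartition, hcol, if_false]
      rcases hb : (pvPartition rest ':').2.1 with _ | _ <;> simp [hb]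

-- the machine on one newline-free line from a fresh state computes pvStepB
theorem machine_line (cs : List Char) : ∀ (s : PySem.Set (List Char)),
    '\n' ∉ cs → (cs.foldl pvStepC (s, 0, [])).1 = pvStepB s cs := by
  induction cs with
  | nil => intro s h; simp [pvStepB, pvPartition]
  | cons c rest ih =>
    intro s h
    simp only [List.mem_cons, not_or] at h
    have hc : ¬ c = '\n' := fun e => h.1 e.symm
    by_cases hbr : c = ']'
    · subst hbr
      simp only [List.foldl_cons, pvStepC, hc, if_false]
      norm_num
      rw [machine_state1 rest s [] h.2]
      simp only [pvStepB, pvPartition, if_true, List.nil_append]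
      rcases hb : (pvPartition rest ':').2.1 with _ | _ <;> simp [hb]
    · simp only [List.foldl_cons, pvStepC, hc, if_false]
      norm_num [hbr]
      rw [ih s h.2]
      simp only [pvStepB, pvPartition, hbr, if_false]

-- the machine over text ++ '\n' folds pvStepB over the lines
theorem machine_main (cs : List Char) : ∀ (s : PySem.Set (List Char)),
    (cs ++ ['\n']).foldl pvStepC (s, 0, []) = ((pvLines cs).foldl pvStepB s, 0, []) := by
  induction hn : cs.length using Nat.strong_induction_on generalizing cs with
  | _ n ih =>
    intro s
    rcases hb : (pvPartition cs '\n').2.1 with _ | _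
    · -- no newline in cs
      have hnl : '\n' ∉ cs := pvPartition_not_found hb
      have hlines : pvLines cs = [cs] := by rw [pvLines]; simp [hb]
      rw [List.foldl_append]
      have hstep : ∀ st : PySem.Set (List Char) × Nat × List Char,
          pvStepC st '\n' = (st.1, 0, []) := by intro st; simp [pvStepC]
      simp only [List.foldl_cons, List.foldl_nil, hstep]
      rw [machine_line cs s hnl, hlines]
      simp
    · -- cs = l ++ '\n' :: r
      have hcs := pvPartition_found hb
      set l := (pvPartition cs '\n').1 with hl
      set r := (pvPartition cs '\n').2.2 with hr
      have hnl : '\n' ∉ l := pvPartition_fst_not_mem cs '\n'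
      have hlines : pvLines cs = l :: pvLines r := by
        conv_lhs => rw [pvLines]
        simp only [hb, dif_pos]
        rw [← hl, ← hr]
      have hlen : r.length < n := by
        have hlen' : cs.length = l.length + 1 + r.length := by
          rw [hcs]; simp; omega
        omega
      have hsplit : cs ++ ['\n'] = l ++ '\n' :: (r ++ ['\n']) := by
        rw [hcs]; simp
      rw [hsplit, List.foldl_append, List.foldl_cons]
      have hstep : ∀ st : PySem.Set (List Char) × Nat × List Char,
          pvStepC st '\n' = (st.1, 0, []) := by intro st; simp [pvStepC]
      rw [hstep, machine_line l s hnl]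
      rw [ih r.length hlen r rfl (pvStepB s l)]
      rw [hlines, List.foldl_cons]

-- ===== VERDICT =====
theorem count_speakers_spec : Claim_equal_count_speakers := by
  intro t _
  unfold Spec_count_speakers count_speakers count_speakers_alt
  rw [splitOn_eq_pvLines, step_eq, machine_main]
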